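-- pv_equiv track=rewrite | github.com/NipunaMadhushan/HackerRank-Interview-Preparation-Kit | Stacks And Queues/Poisonous Plants.py | poisonousPlants
-- ===== SOURCE A (Python) =====
-- def poisonousPlants(plants):
--     stack = []
--     max_days = 0
--
--     for plant in plants:
--         days = 1
--
--         while stack and stack[-1][0] >= plant:
--             _, d = stack.pop()
--             days = max(days, d + 1)
--
--         if not stack:
--             days = 0
--
--         max_days = max(max_days, days)
--         stack.append((plant, days))
--
--     return max_days
-- ===== SOURCE B (Python) =====
-- def poisonousPlants(plants):
--     cur = list(plants)
--     days = 0
--     while True: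
--         nxt = cur[:1] + [b for a, b in zip(cur, cur[1:]) if b <= a]
--         if len(nxt) == len(cur):
--             return days
--         cur = nxt
--         days += 1
-- ===== Notes on version B (the rewrite author's own statement) =====
-- stated objective: alternative
-- what changed: Replaced A's single-pass monotonic stack (which tracks per-plant death days) with a direct day-by-day simulation: each round removes every plant strictly greater than its left neighbor in the current snapshot and counts rounds until no plant dies.
import Mathlib
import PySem

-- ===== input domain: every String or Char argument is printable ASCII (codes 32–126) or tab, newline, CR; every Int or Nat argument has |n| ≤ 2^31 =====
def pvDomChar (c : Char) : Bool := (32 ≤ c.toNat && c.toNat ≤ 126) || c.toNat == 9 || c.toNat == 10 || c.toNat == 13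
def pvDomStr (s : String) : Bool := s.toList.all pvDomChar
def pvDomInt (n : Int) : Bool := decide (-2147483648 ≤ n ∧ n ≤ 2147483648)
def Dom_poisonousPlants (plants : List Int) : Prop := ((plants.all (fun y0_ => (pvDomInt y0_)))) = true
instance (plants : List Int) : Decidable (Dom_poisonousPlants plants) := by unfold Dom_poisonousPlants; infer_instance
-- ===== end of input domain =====

-- B replaces A's one-pass monotonic-stack computation by a direct day-by-day simulation of the
-- simultaneous deaths (objective: alternative algorithm; B is not faster).

-- ===== PORT A =====
-- the 'while stack and stack[-1][0] >= plant' pop loop; stack top = list head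
def popLoop (plant : Int) : List (Int × Int) → Int → List (Int × Int) × Int
  | [], days => ([], days)
  | (v, d) :: rest, days =>
    if v ≥ plant then popLoop plant rest (max days (d + 1))
    else ((v, d) :: rest, days)

-- one iteration of A's 'for plant in plants' loop over the state (stack, max_days)
def stepA (acc : List (Int × Int) × Int) (plant : Int) : List (Int × Int) × Int :=
  let r := popLoop plant acc.1 1
  let days : Int := if r.1 = [] then 0 else r.2
  ((plant, days) :: r.1, max acc.2 days)

def poisonousPlants (plants : List Int) : Int :=
  (plants.foldl stepA ([], 0)).2

-- ===== PORT B =====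
-- 'cur[:1] + [b for a, b in zip(cur, cur[1:]) if b <= a]'
def stepB (cur : List Int) : List Int :=
  cur.take 1 ++ (cur.zip cur.tail).filterMap (fun ab => if ab.2 ≤ ab.1 then some ab.2 else none)

-- termination facts for simLoop (cited by name in decreasing_by)
lemma zipFilter_length_le (t : List Int) : ∀ h : Int,
    ((List.zip (h :: t) t).filterMap (fun ab => if ab.2 ≤ ab.1 then some ab.2 else none)).length ≤ t.length := by
  induction t with
  | nil => intro h; simp
  | cons x t' ih =>
    intro h
    simp only [List.zip_cons_cons, List.filterMap_cons]
    split
    · exact Nat.le_trans (ih x) (Nat.le_succ _)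
    · simpa using Nat.succ_le_succ (ih x)

lemma stepB_length_le (cur : List Int) : (stepB cur).length ≤ cur.length := by
  cases cur with
  | nil => simp [stepB]
  | cons h t =>
    have h1 := zipFilter_length_le t h
    simp only [stepB, List.take_succ_cons, List.take_zero, List.tail_cons, List.length_append,
      List.length_cons, List.length_nil]
    omega

-- the 'while True' loop of B, carrying the day counter
def simLoop (cur : List Int) (days : Int) : Int :=
  if h : (stepB cur).length = cur.length then days
  else simLoop (stepB cur) (days + 1)
termination_by cur.length
decreasing_by exact Nat.lt_of_le_of_ne (stepB_length_le cur) h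

def poisonousPlants_alt (plants : List Int) : Int :=
  simLoop plants 0

-- ===== PRECONDITION & SPEC =====
def Spec_poisonousPlants (plants : List Int) (out : Int) : Prop := out = poisonousPlants_alt plants
instance (plants : List Int) (out : Int) : Decidable (Spec_poisonousPlants plants out) := by unfold Spec_poisonousPlants; infer_instance

-- ===== CLAIM (what is proved, stated in full; the proofs are below) =====
def Claim_equal_poisonousPlants : Prop := ∀ (plants : List Int), Dom_poisonousPlants plants → Spec_poisonousPlants plants (poisonousPlants plants)

-- ===== LEMMAS AND PROOFS =====

-- survivors of one day among the tail, given the value standing immediately to the left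
def survTail : Int → List Int → List Int
  | _, [] => []
  | prev, x :: t => if x ≤ prev then x :: survTail x t else survTail x t

lemma zipFilter_eq_survTail (t : List Int) : ∀ h : Int,
    (List.zip (h :: t) t).filterMap (fun ab => if ab.2 ≤ ab.1 then some ab.2 else none) = survTail h t := by
  induction t with
  | nil => intro h; simp [survTail]
  | cons x t' ih =>
    intro h
    simp only [List.zip_cons_cons, List.filterMap_cons, survTail]
    by_cases hxh : x ≤ h <;> simp [hxh, ih x]

lemma stepB_nil : stepB [] = [] := rfl

lemma stepB_cons (h : Int) (t : List Int) : stepB (h :: t) = h :: survTail h t := by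
  simp [stepB, zipFilter_eq_survTail]

lemma survTail_sublist (t : List Int) : ∀ prev, List.Sublist (survTail prev t) t := by
  induction t with
  | nil => intro prev; simp [survTail]
  | cons x t' ih =>
    intro prev
    simp only [survTail]
    split
    · exact List.Sublist.cons₂ x (ih x)
    · exact List.Sublist.cons x (ih x)

lemma stepB_sublist (cur : List Int) : List.Sublist (stepB cur) cur := by
  cases cur with
  | nil => simp [stepB]
  | cons h t => rw [stepB_cons]; exact List.Sublist.cons₂ h (survTail_sublist t h)

lemma stepB_eq_of_length (cur : List Int) (h : (stepB cur).length = cur.length) : stepB cur = cur :=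
  (stepB_sublist cur).eq_of_length h

lemma survTail_length_le (t : List Int) (prev : Int) : (survTail prev t).length ≤ t.length :=
  (survTail_sublist t prev).length_le

-- day-shift on death days: never-dying (0) stays 0, day d ≥ 1 becomes d - 1
def fdec (d : Int) : Int := max (d - 1) 0

-- the shadow of A's stack after one simulated day: drop day-1 entries, shift the rest
def decF : List (Int × Int) → List (Int × Int) :=
  List.filterMap (fun e => if e.2 = 1 then none else some (e.1, fdec e.2))

lemma decF_nil : decF [] = [] := rfl

lemma decF_cons (v d : Int) (S : List (Int × Int)) :
    decF ((v, d) :: S) = if d = 1 then decF S else (v, fdec d) :: decF S := by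
  simp only [decF, List.filterMap_cons]
  split <;> simp_all

lemma decF_zero (v : Int) : decF [(v, 0)] = [(v, 0)] := by
  norm_num [decF_cons, decF_nil, fdec]

-- well-formed stack: bottom entry has day 0, entries above have day ≥ 1, values strictly decrease downward
inductive WF : List (Int × Int) → Prop
  | base (v : Int) : WF [(v, 0)]
  | cons (v d v' d' : Int) (rest : List (Int × Int)) :
      1 ≤ d → v' < v → WF ((v', d') :: rest) → WF ((v, d) :: (v', d') :: rest)

lemma wf_lt_head : ∀ S, WF S → ∀ v d rest, S = (v, d) :: rest → ∀ e ∈ rest, e.1 < v := by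
  intro S h
  induction h with
  | base w =>
    intro v d rest heq e he
    injection heq with _ h2
    subst h2
    simp at he
  | cons w dd w' dd' rest h1 h2 _ ih =>
    intro v d r heq e he
    injection heq with hp hr
    injection hp with hv _
    subst hv; subst hr
    rcases List.mem_cons.mp he with rfl | he'
    · simpa using h2
    · have := ih w' dd' rest rfl e he'
      omega

lemma wf_decF_ne_nil : ∀ S, WF S → decF S ≠ [] := by
  intro S h
  induction h with
  | base v => rw [decF_zero]; simp
  | cons v d v' d' rest _ _ _ ih =>
    rw [decF_cons]
    split
    · exact ih
    · simp

lemma decF_lt (S : List (Int × Int)) (x : Int) (h : ∀ e ∈ S, e.1 < x) :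
    ∀ e ∈ decF S, e.1 < x := by
  intro e he
  rw [decF, List.mem_filterMap] at he
  obtain ⟨a, ha, heq⟩ := he
  by_cases h1 : a.2 = 1
  · simp [h1] at heq
  · simp only [h1, if_false, Option.some.injEq] at heq
    subst heq
    exact h a ha

lemma popLoop_stop (x acc : Int) (L : List (Int × Int)) (h : ∀ e ∈ L, e.1 < x) :
    popLoop x L acc = (L, acc) := by
  cases L with
  | nil => rfl
  | cons e rest =>
    obtain ⟨v, d⟩ := e
    have hv : ¬ v ≥ x := by have := h (v, d) (by simp); simp at this ⊢; omega
    simp [popLoop, hv]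

-- the heart: how one pop-phase of A relates to the pop-phase on the day-shifted stack
lemma pop_main : ∀ S, WF S → ∀ x a : Int, 1 ≤ a →
    ((∀ v d rest, S = (v, d) :: rest → x ≤ v) ∨ 2 ≤ a) →
    ((∃ w, popLoop x S a = ([], w)) ∧ (∃ w', popLoop x (decF S) (max (a - 1) 1) = ([], w')))
    ∨ (∃ B days, popLoop x S a = (B, days) ∧ B ≠ [] ∧ 2 ≤ days ∧ WF B ∧ (∀ e ∈ B, e.1 < x)
        ∧ popLoop x (decF S) (max (a - 1) 1) = (decF B, days - 1)) := by
  intro S hwf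
  induction hwf with
  | base v =>
    intro x a ha hside
    by_cases hvx : v ≥ x
    · left
      refine ⟨⟨max a (0 + 1), ?_⟩, ⟨max (max (a - 1) 1) (0 + 1), ?_⟩⟩
      · simp [popLoop, hvx]
      · rw [decF_zero]; simp [popLoop, hvx]
    · right
      have ha2 : 2 ≤ a := by
        rcases hside with hL | h2
        · have := hL v 0 [] rfl; omega
        · exact h2
      refine ⟨[(v, 0)], a, by simp [popLoop, hvx], by simp, ha2, WF.base v, ?_, ?_⟩
      · intro e he
        simp at he
        rcases he with ⟨h1, _⟩
        omega
      · rw [decF_zero, popLoop_stop x _ _ (by intro e he; simp at he; rcases he with ⟨h1, _⟩; omega)]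
        rw [show max (a - 1) 1 = a - 1 from by omega]
  | cons v d v' d' rest h1 hlt hwfrest ih =>
    intro x a ha hside
    by_cases hvx : v ≥ x
    · have hstep : popLoop x ((v, d) :: (v', d') :: rest) a
          = popLoop x ((v', d') :: rest) (max a (d + 1)) := by
        simp [popLoop, hvx]
      have hsacc : popLoop x (decF ((v, d) :: (v', d') :: rest)) (max (a - 1) 1)
          = popLoop x (decF ((v', d') :: rest)) (max (max a (d + 1) - 1) 1) := by
        rw [decF_cons]
        by_cases hd1 : d = 1
        · subst hd1
          rw [if_pos rfl]
          congr 1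
          omega
        · rw [if_neg hd1]
          have hf : fdec d = d - 1 := by unfold fdec; omega
          simp only [popLoop, hvx, if_pos]
          congr 1
          rw [hf]
          omega
      rw [hstep, hsacc]
      exact ih x (max a (d + 1)) (by omega) (Or.inr (by omega))
    · have ha2 : 2 ≤ a := by
        rcases hside with hL | h2
        · have := hL v d _ rfl; omega
        · exact h2
      right
      have hwfS : WF ((v, d) :: (v', d') :: rest) := WF.cons v d v' d' rest h1 hlt hwfrest
      have hallS : ∀ e ∈ (v, d) :: (v', d') :: rest, e.1 < x := by
        intro e he
        rcases List.mem_cons.mp he with rfl | he'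
        · simp; omega
        · have := wf_lt_head _ hwfS v d _ rfl e he'
          omega
      refine ⟨_, a, by simp [popLoop, hvx], by simp, ha2, hwfS, hallS, ?_⟩
      rw [popLoop_stop x _ _ (decF_lt _ x hallS)]
      rw [show max (a - 1) 1 = a - 1 from by omega]

lemma stepA_surv (x prev dp m : Int) (S' : List (Int × Int))
    (hwf : WF ((prev, dp) :: S')) (hx : x ≤ prev) :
    ∃ d0 B, d0 ≠ 1 ∧ stepA ((prev, dp) :: S', m) x = ((x, d0) :: B, max m d0)
      ∧ WF ((x, d0) :: B)
      ∧ stepA (decF ((prev, dp) :: S'), fdec m) x = (decF ((x, d0) :: B), fdec (max m d0)) := by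
  have hside : (∀ v d rest, ((prev, dp) :: S') = (v, d) :: rest → x ≤ v) ∨ 2 ≤ (1 : Int) := by
    left
    intro v d r heq
    injection heq with h1 _
    injection h1 with hv _
    omega
  have hacc : max ((1 : Int) - 1) 1 = 1 := by omega
  rcases pop_main _ hwf x 1 le_rfl hside with ⟨⟨w, hp⟩, ⟨w', hs⟩⟩ | ⟨B, days, hp, hBne, hd2, hwfB, hBlt, hs⟩
  · rw [hacc] at hs
    refine ⟨0, [], by omega, by simp [stepA, hp], WF.base x, ?_⟩
    rw [show stepA (decF ((prev, dp) :: S'), fdec m) x = ((x, 0) :: [], max (fdec m) 0) from by simp [stepA, hs]]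
    rw [decF_zero, show fdec (max m 0) = max (fdec m) 0 from by unfold fdec; omega]
  · rw [hacc] at hs
    obtain ⟨e, Brest, rfl⟩ := List.exists_cons_of_ne_nil hBne
    obtain ⟨b1, b2⟩ := e
    have hwf2 : WF ((x, days) :: (b1, b2) :: Brest) :=
      WF.cons x days b1 b2 Brest (by omega) (hBlt (b1, b2) (by simp)) hwfB
    refine ⟨days, (b1, b2) :: Brest, ?_, ?_, hwf2, ?_⟩
    · omega
    · simp [stepA, hp]
    · have hdne : decF ((b1, b2) :: Brest) ≠ [] := wf_decF_ne_nil _ hwfB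
      rw [show decF ((x, days) :: (b1, b2) :: Brest)
            = (x, fdec days) :: decF ((b1, b2) :: Brest) from by
        rw [decF_cons, if_neg (show days ≠ 1 from by omega)]]
      rw [show fdec days = days - 1 from by unfold fdec; omega]
      rw [show fdec (max m days) = max (fdec m) (days - 1) from by unfold fdec; omega]
      simp [stepA, hs, hdne]

lemma stepA_death (x prev dp m : Int) (S' : List (Int × Int)) (hx : prev < x) :
    stepA ((prev, dp) :: S', m) x = ((x, 1) :: (prev, dp) :: S', max m 1) := by
  have h : ¬ prev ≥ x := by omega
  simp [stepA, popLoop, h]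

lemma main_transport : ∀ t : List Int, ∀ prev dp m : Int, ∀ S' : List (Int × Int),
    WF ((prev, dp) :: S') →
    List.foldl stepA (decF ((prev, dp) :: S'), fdec m) (survTail prev t)
      = (decF (List.foldl stepA ((prev, dp) :: S', m) t).1,
         fdec (List.foldl stepA ((prev, dp) :: S', m) t).2) := by
  intro t
  induction t with
  | nil => intro prev dp m S' _; simp [survTail]
  | cons x t' ih =>
    intro prev dp m S' hwf
    by_cases hx : x ≤ prev
    · rw [show survTail prev (x :: t') = x :: survTail x t' from by simp [survTail, hx]]
      obtain ⟨d0, B, _, hA, hwfB, hS⟩ := stepA_surv x prev dp m S' hwf hx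
      rw [List.foldl_cons, List.foldl_cons, hA, hS]
      exact ih x d0 (max m d0) B hwfB
    · rw [show survTail prev (x :: t') = survTail x t' from by simp [survTail, hx]]
      have hA := stepA_death x prev dp m S' (by omega)
      have hwf2 : WF ((x, 1) :: (prev, dp) :: S') := WF.cons _ _ _ _ _ le_rfl (by omega) hwf
      have key := ih x 1 (max m 1) ((prev, dp) :: S') hwf2
      rw [List.foldl_cons, hA]
      rw [decF_cons, if_pos rfl] at key
      rw [show fdec (max m 1) = fdec m from by unfold fdec; omega] at key
      exact key

lemma stepA_first (h : Int) : stepA (([] : List (Int × Int)), (0 : Int)) h = ([(h, 0)], 0) := by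
  simp [stepA, popLoop]

lemma A_step (h : Int) (t : List Int) :
    poisonousPlants (stepB (h :: t)) = fdec (poisonousPlants (h :: t)) := by
  rw [stepB_cons]
  unfold poisonousPlants
  rw [List.foldl_cons, List.foldl_cons, stepA_first]
  have key := main_transport t h 0 0 [] (WF.base h)
  rw [decF_zero, show fdec 0 = 0 from by unfold fdec; omega] at key
  rw [key]

lemma m_mono : ∀ t : List Int, ∀ S : List (Int × Int), ∀ m : Int,
    m ≤ (List.foldl stepA (S, m) t).2 := by
  intro t
  induction t with
  | nil => intro S m; simp
  | cons x t' ih =>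
    intro S m
    rw [List.foldl_cons]
    have h2 : m ≤ (stepA (S, m) x).2 := le_max_left _ _
    have h3 := ih (stepA (S, m) x).1 (stepA (S, m) x).2
    simp only [Prod.mk.eta] at h3
    exact le_trans h2 h3

lemma pos_main : ∀ t : List Int, ∀ prev dp m : Int, ∀ S' : List (Int × Int),
    survTail prev t ≠ t → 1 ≤ (List.foldl stepA ((prev, dp) :: S', m) t).2 := by
  intro t
  induction t with
  | nil => intro prev dp m S' hne; simp [survTail] at hne
  | cons x t' ih =>
    intro prev dp m S' hne
    by_cases hx : x ≤ prev
    · have hne' : survTail x t' ≠ t' := by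
        intro h
        apply hne
        simp [survTail, hx, h]
      rw [List.foldl_cons]
      rcases hr : popLoop x ((prev, dp) :: S') 1 with ⟨R, w⟩
      have hA : stepA ((prev, dp) :: S', m) x
          = ((x, if R = [] then 0 else w) :: R, max m (if R = [] then 0 else w)) := by
        simp [stepA, hr]
      rw [hA]
      exact ih x _ _ R hne'
    · rw [List.foldl_cons, stepA_death x prev dp m S' (by omega)]
      calc (1 : Int) ≤ max m 1 := le_max_right _ _
        _ ≤ _ := m_mono t' _ _

lemma zero_main : ∀ t : List Int, ∀ prev m : Int, 0 ≤ m → survTail prev t = t →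
    (List.foldl stepA ([(prev, 0)], m) t).2 = m := by
  intro t
  induction t with
  | nil => intro prev m _ _; simp
  | cons x t' ih =>
    intro prev m h0 heq
    have hx : x ≤ prev := by
      by_contra hgt
      rw [show survTail prev (x :: t') = survTail x t' from by simp [survTail, hgt]] at heq
      have h1 := survTail_length_le t' x
      have h2 := congrArg List.length heq
      simp at h2
      omega
    have heq' : survTail x t' = t' := by
      simp [survTail, hx] at heq
      exact heq
    rw [List.foldl_cons]
    have hge : prev ≥ x := hx
    have hpop : popLoop x [(prev, 0)] 1 = ([], max 1 (0 + 1)) := by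
      simp [popLoop, hge]
    have hA : stepA ([(prev, 0)], m) x = ([(x, 0)], max m 0) := by
      simp [stepA, hpop]
    rw [hA, show max m 0 = m from by omega]
    exact ih x m h0 heq'

lemma A_zero (p : List Int) (h : stepB p = p) : poisonousPlants p = 0 := by
  cases p with
  | nil => rfl
  | cons x t =>
    rw [stepB_cons] at h
    have ht : survTail x t = t := by injection h
    unfold poisonousPlants
    rw [List.foldl_cons, stepA_first]
    exact zero_main t x 0 le_rfl ht

lemma simLoop_eq : ∀ n : Nat, ∀ cur : List Int, ∀ days : Int, cur.length ≤ n →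
    simLoop cur days = days + poisonousPlants cur := by
  intro n
  induction n with
  | zero =>
    intro cur days hlen
    have h0 : cur.length = 0 := Nat.le_zero.mp hlen
    have hnil : cur = [] := by
      cases cur with
      | nil => rfl
      | cons a b => simp at h0
    subst hnil
    rw [simLoop]
    simp [stepB_nil, poisonousPlants]
  | succ n ih =>
    intro cur days hlen
    rw [simLoop]
    by_cases hl : (stepB cur).length = cur.length
    · rw [dif_pos hl, A_zero cur (stepB_eq_of_length cur hl)]
      omega
    · rw [dif_neg hl]
      have hlt : (stepB cur).length < cur.length := Nat.lt_of_le_of_ne (stepB_length_le cur) hl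
      rw [ih (stepB cur) (days + 1) (by omega)]
      cases cur with
      | nil => simp [stepB_nil] at hl
      | cons h t =>
        rw [A_step h t]
        have hst : survTail h t ≠ t := by
          intro hcontra
          apply hl
          rw [stepB_cons, hcontra]
        have hpos : 1 ≤ poisonousPlants (h :: t) := by
          unfold poisonousPlants
          rw [List.foldl_cons, stepA_first]
          exact pos_main t h 0 0 [] hst
        unfold fdec
        omega

lemma alt_eq (plants : List Int) : poisonousPlants_alt plants = poisonousPlants plants := by
  unfold poisonousPlants_alt
  rw [simLoop_eq plants.length plants 0 le_rfl]
  omega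

-- ===== VERDICT (by name: the statement is the Claim_ definition above) =====
theorem poisonousPlants_spec : Claim_equal_poisonousPlants := by
  intro plants _
  unfold Spec_poisonousPlants
  rw [alt_eq]
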